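-- pv_equiv track=rewrite | github.com/anneschuth/AdventOfCode2024 | day2/part2.py | save_report
-- ===== SOURCE A (Python) =====
-- import copy
--
-- def save_report(r):
--     report = copy.deepcopy(r)
--     x = report.pop(0)
--     asc = None
--     for y in report:
--         if abs(x - y) > 3:
--             return False
--         a = 1 if y > x else -1 if y < x else 0
--         if asc is not None and a != asc:
--             return False
--         elif asc is None:
--             asc = a
--         x = y
--     return True
-- ===== SOURCE B (Python) =====
-- def save_report(r):
--     diffs = [b - a for a, b in zip(r, r[1:])]
--     if any(abs(d) > 3 for d in diffs):
--         return False
--     signs = {(d > 0) - (d < 0) for d in diffs}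
--     return len(signs) <= 1
-- ===== Notes on version B (the rewrite author's own statement) =====
-- stated objective: simpler
-- what changed: B builds the adjacent-difference list once and checks it with two aggregate predicates (max step <= 3, and the set of difference signs has at most one element) instead of A's single running-state scan with a mutable 'asc' flag and deepcopy/pop mutation.
-- outside the precondition, e.g. on save_report([]): A raises IndexError, B returns True
-- crash fix: On the empty list A raises IndexError (pop from empty list) while B returns True (no adjacent pairs to violate safety). — e.g. on save_report([]): A raises IndexError, B returns true
import Mathlib
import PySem

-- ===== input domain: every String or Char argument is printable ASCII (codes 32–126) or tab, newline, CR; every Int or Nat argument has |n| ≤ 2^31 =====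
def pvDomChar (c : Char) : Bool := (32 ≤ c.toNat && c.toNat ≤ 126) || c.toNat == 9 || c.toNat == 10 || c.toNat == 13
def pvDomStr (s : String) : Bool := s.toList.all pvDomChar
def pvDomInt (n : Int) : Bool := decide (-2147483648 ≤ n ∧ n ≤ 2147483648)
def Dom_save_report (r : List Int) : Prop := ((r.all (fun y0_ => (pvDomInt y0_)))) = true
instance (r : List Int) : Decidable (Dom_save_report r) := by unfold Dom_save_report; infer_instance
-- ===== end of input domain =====

-- B replaces A's running-state scan (mutable `asc` flag, deepcopy + pop) by an adjacent-difference
-- list checked with two aggregate predicates (objective: simpler). Return-value equivalence only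
-- (A deep-copies, so neither mutates the caller's list).

-- ===== PORT A =====
-- the for-loop of A: state x (previous element) and asc (the remembered direction)
def save_report_loop (x : Int) (asc : Option Int) : List Int → Bool
  | [] => true
  | y :: ys =>
    if (x - y).natAbs > 3 then false
    else
      let a : Int := if y > x then 1 else if y < x then -1 else 0
      match asc with
      | some s => if a ≠ s then false else save_report_loop y (some s) ys
      | none => save_report_loop y (some a) ys

def save_report (r : List Int) : Bool :=
  match r with
  | [] => false   -- report.pop(0) raises IndexError here; excluded by Pre_save_report
  | x :: report => save_report_loop x none report

-- ===== PORT B =====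
-- r[1:] on a list is exactly List.drop 1; zip truncates like Python's zip
def save_report_alt (r : List Int) : Bool :=
  let diffs := (r.zip (r.drop 1)).map (fun p => p.2 - p.1)
  if diffs.any (fun d => 3 < d.natAbs) then false
  else decide ((PySem.Set.ofList (diffs.map
        (fun d => (if 0 < d then (1 : Int) else 0) - (if d < 0 then 1 else 0)))).length ≤ 1)

-- ===== PRECONDITION & SPEC =====
-- A raises IndexError (pop from empty list) on []; Pre_ excludes exactly that input.
def Pre_save_report (r : List Int) : Prop := r ≠ []
instance (r : List Int) : Decidable (Pre_save_report r) := by unfold Pre_save_report; infer_instance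
def pvWitness_save_report : List Int := [1, 2, 3]

-- On the empty list A raises IndexError (pop from empty list) while B returns True.
def Raises_save_report (r : List Int) : Prop := r = []
instance (r : List Int) : Decidable (Raises_save_report r) := by unfold Raises_save_report; infer_instance
def pvRaiseWitness_save_report : List Int := []
def pvRaiseWitnessOut_save_report : Bool := true

def Spec_save_report (r : List Int) (out : Bool) : Prop := out = save_report_alt r
instance (r : List Int) (out : Bool) : Decidable (Spec_save_report r out) := by unfold Spec_save_report; infer_instance

-- ===== CLAIM (what is proved, stated in full; the proofs are below) =====
def Claim_equal_save_report : Prop := ∀ (r : List Int), Dom_save_report r → Pre_save_report r → Spec_save_report r (save_report r)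
def Claim_raises_save_report : Prop := (∀ (r : List Int), Dom_save_report r → Raises_save_report r → ¬ Pre_save_report r) ∧ (Dom_save_report (pvRaiseWitness_save_report) ∧ Raises_save_report (pvRaiseWitness_save_report) ∧ save_report_alt (pvRaiseWitness_save_report) = pvRaiseWitnessOut_save_report)

-- ===== LEMMAS AND PROOFS =====

-- the sign of a difference
def pvSign (d : Int) : Int := (if 0 < d then 1 else 0) - (if d < 0 then 1 else 0)

-- the adjacent-difference list
def pvDiffs (r : List Int) : List Int := (r.zip (r.drop 1)).map (fun p => p.2 - p.1)

lemma pvDiffs_cons₂ (x y : Int) (t : List Int) :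
    pvDiffs (x :: y :: t) = (y - x) :: pvDiffs (y :: t) := by
  simp [pvDiffs]

-- reference predicate: every step from x through ys has |d| ≤ 3 and sign s
def pvGood (s x : Int) : List Int → Bool
  | [] => true
  | y :: ys => (!decide (3 < (y - x).natAbs)) && (pvSign (y - x) == s) && pvGood s y ys

lemma sign_eq (x y : Int) :
    (if y > x then (1 : Int) else if y < x then -1 else 0) = pvSign (y - x) := by
  unfold pvSign; split_ifs <;> omega

lemma loop_some_eq_good (ys : List Int) : ∀ (x s : Int),
    save_report_loop x (some s) ys = pvGood s x ys := by
  induction ys with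
  | nil => intro x s; rfl
  | cons y t ih =>
    intro x s
    simp only [save_report_loop, pvGood]
    by_cases h3 : (x - y).natAbs > 3
    · have : 3 < (y - x).natAbs := by omega
      simp [h3, this]
    · have h3' : ¬ 3 < (y - x).natAbs := by omega
      by_cases hs : (if y > x then (1 : Int) else if y < x then -1 else 0) = s
      · simp [h3, h3', hs, ih, ← sign_eq]
      · have : pvSign (y - x) ≠ s := by rw [← sign_eq]; exact hs
        simp [h3, h3', hs, this]

lemma good_eq_all (t : List Int) : ∀ (y s : Int),
    pvGood s y t = (pvDiffs (y :: t)).all (fun d => (!decide (3 < d.natAbs)) && (pvSign d == s)) := by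
  induction t with
  | nil => intro y s; rfl
  | cons z t ih =>
    intro y s
    rw [pvDiffs_cons₂]
    simp only [pvGood, List.all_cons, ih]

-- length of a foldl of Set.add never decreases
lemma len_foldl_add_ge (l : List Int) : ∀ (s : PySem.Set Int),
    s.length ≤ (l.foldl PySem.Set.add s).length := by
  induction l with
  | nil => intro s; simp
  | cons b t ih =>
    intro s
    refine le_trans ?_ (ih (PySem.Set.add s b))
    simp only [PySem.Set.add]
    split <;> simp

-- a set built from a :: l is a singleton iff every element of l equals a
lemma setlen_le_one (l : List Int) : ∀ (a : Int),
    ((PySem.Set.ofList (a :: l)).length ≤ 1) ↔ (∀ b ∈ l, b = a) := by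
  induction l with
  | nil => intro a; simp [PySem.Set.ofList, PySem.Set.add, PySem.Set.empty]
  | cons b t ih =>
    intro a
    by_cases hb : b = a
    · subst hb
      have h1 : PySem.Set.ofList (b :: b :: t) = PySem.Set.ofList (b :: t) := by
        simp [PySem.Set.ofList, PySem.Set.add, PySem.Set.empty, PySem.Set.contains]
      rw [h1, ih]
      constructor
      · intro h c hc
        rcases List.mem_cons.mp hc with rfl | hc
        · rfl
        · exact h c hc
      · intro h c hc; exact h c (List.mem_cons_of_mem _ hc)
    · constructor
      · intro h
        exfalso
        have h1 : PySem.Set.ofList (a :: b :: t) = t.foldl PySem.Set.add [a, b] := by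
          simp [PySem.Set.ofList, PySem.Set.add, PySem.Set.empty, PySem.Set.contains, hb]
      
        have h2 := len_foldl_add_ge t [a, b]
        rw [h1] at h
        simp at h2
        omega
      · intro h
        exact absurd (h b (by simp)) hb

lemma all_split (dl : List Int) (s : Int) :
    (dl.all (fun d => (!decide (3 < d.natAbs)) && (pvSign d == s)))
      = ((!dl.any (fun d => decide (3 < d.natAbs))) && dl.all (fun d => pvSign d == s)) := by
  induction dl with
  | nil => rfl
  | cons d t ih =>
    simp only [List.all_cons, List.any_cons, ih, Bool.not_or]
    ac_rfl

-- main bridge: on a list with at least two elements, both sides reduce to pvGood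
lemma alt_cons₂ (x y : Int) (t : List Int) :
    save_report_alt (x :: y :: t)
      = ((!decide (3 < (y - x).natAbs)) && pvGood (pvSign (y - x)) y t) := by
  have hd : (((x :: y :: t).zip ((x :: y :: t).drop 1)).map (fun p => p.2 - p.1))
      = pvDiffs (x :: y :: t) := rfl
  rw [save_report_alt]
  simp only [hd, pvDiffs_cons₂]
  have hsig : (fun d => (if 0 < d then (1 : Int) else 0) - (if d < 0 then 1 else 0)) = pvSign := by
    funext d; rfl
  rw [hsig]
  by_cases hb : 3 < (y - x).natAbs
  · simp [hb]
  · by_cases hrest : (pvDiffs (y :: t)).any (fun d => decide (3 < d.natAbs))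
    · -- some later diff is bad: both sides false
      simp only [List.any_cons, hrest, hb, decide_false, Bool.false_or, if_true]
      rw [good_eq_all, all_split]
      simp [hrest]
    · simp only [List.any_cons, hrest, hb, decide_false, Bool.false_or, Bool.or_false]
      rw [good_eq_all, all_split]
      simp only [hrest, Bool.not_false, Bool.true_and, List.map_cons, if_false,
        Bool.false_eq_true]
      rw [Bool.eq_iff_iff, decide_eq_true_eq, setlen_le_one]
      simp only [List.all_eq_true, beq_iff_eq, List.mem_map]
      constructor
      · intro h d hd; exact h _ ⟨d, hd, rfl⟩
      · rintro h b ⟨d, hd, rfl⟩; exact h d hd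

theorem save_report_spec : Claim_equal_save_report := by
  intro r _ hpre
  unfold Spec_save_report
  match r with
  | [] => exact absurd rfl hpre
  | [x] => rfl
  | x :: y :: t =>
    rw [alt_cons₂]
    show save_report_loop x none (y :: t) = _
    simp only [save_report_loop]
    by_cases hb : (x - y).natAbs > 3
    · have : 3 < (y - x).natAbs := by omega
      simp [hb, this]
    · have : ¬ 3 < (y - x).natAbs := by omega
      simp [hb, this, loop_some_eq_good, sign_eq]

@[simp]
theorem save_report_raises : Claim_raises_save_report := by
  unfold Claim_raises_save_report
  exact ⟨fun r _ h => by simp [Raises_save_report] at h; simp [h, Pre_save_report], by decide⟩
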